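-- pv_equiv track=rewrite | github.com/nzhoward/daily-coding-problem | solutions/day68.py | count_attacks
-- ===== SOURCE A (Python) =====
-- from itertools import combinations
--
-- def count_attacks(bishops):
--     cnt = 0
--     for comb in combinations(bishops, 2):
--         first = comb[0]
--         second = comb[1]
--         if abs(first[0] - second[0]) == abs(first[1] - second[1]):
--             cnt += 1
--     return cnt
-- ===== SOURCE B (Python) =====
-- def count_attacks(bishops):
--     sums = {}
--     diffs = {}
--     pos = {}
--     cnt = 0
--     for (r, c) in bishops:
--         s = r + c
--         d = r - c
--         cnt += sums.get(s, 0) + diffs.get(d, 0) - pos.get((r, c), 0)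
--         sums[s] = sums.get(s, 0) + 1
--         diffs[d] = diffs.get(d, 0) + 1
--         pos[(r, c)] = pos.get((r, c), 0) + 1
--     return cnt
-- ===== Notes on version B (the rewrite author's own statement) =====
-- stated objective: faster
-- what changed: Replaced the O(n^2) scan over all pairs by a single pass that groups bishops by the two diagonal keys r+c and r-c in dicts (with an inclusion-exclusion correction for coincident positions), adding for each bishop the number of earlier bishops sharing a diagonal.
import Mathlib
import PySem

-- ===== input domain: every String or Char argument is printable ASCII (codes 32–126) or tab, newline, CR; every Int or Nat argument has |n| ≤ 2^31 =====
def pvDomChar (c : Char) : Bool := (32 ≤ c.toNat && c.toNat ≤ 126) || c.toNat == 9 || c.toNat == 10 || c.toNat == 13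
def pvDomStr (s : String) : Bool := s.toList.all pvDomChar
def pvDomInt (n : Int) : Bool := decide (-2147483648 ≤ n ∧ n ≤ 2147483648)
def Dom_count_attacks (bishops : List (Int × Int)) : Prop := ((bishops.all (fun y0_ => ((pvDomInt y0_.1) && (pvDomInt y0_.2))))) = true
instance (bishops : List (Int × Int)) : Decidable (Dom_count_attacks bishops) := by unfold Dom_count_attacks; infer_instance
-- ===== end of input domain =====

-- B replaces A's O(n^2) all-pairs scan with one pass over dicts keyed by the diagonals r+c and r-c
-- (minus coincident-cell pairs counted twice); proved to return the same count on every input.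

-- ===== PORT A =====
-- combinations(bishops, 2) in iteration order: each element paired with every later one
def pvCombs2 : List (Int × Int) → List ((Int × Int) × (Int × Int))
  | [] => []
  | x :: xs => xs.map (fun y => (x, y)) ++ pvCombs2 xs

def count_attacks (bishops : List (Int × Int)) : Int :=
  (pvCombs2 bishops).foldl
    (fun cnt comb =>
      let first := comb.1
      let second := comb.2
      if (first.1 - second.1).natAbs == (first.2 - second.2).natAbs then cnt + 1 else cnt)
    0

-- ===== PORT B =====
def pvLoopB : List (Int × Int) → PySem.Dict Int Int → PySem.Dict Int Int →
    PySem.Dict (Int × Int) Int → Int → Int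
  | [], _, _, _, cnt => cnt
  | x :: xs, sums, diffs, pos, cnt =>
    let s := x.1 + x.2
    let d := x.1 - x.2
    let cnt' := cnt + (sums.getD s 0 + diffs.getD d 0 - pos.getD x 0)
    pvLoopB xs (sums.insert s (sums.getD s 0 + 1)) (diffs.insert d (diffs.getD d 0 + 1))
      (pos.insert x (pos.getD x 0 + 1)) cnt'

def count_attacks_alt (bishops : List (Int × Int)) : Int :=
  pvLoopB bishops PySem.Dict.empty PySem.Dict.empty PySem.Dict.empty 0

-- ===== PRECONDITION & SPEC =====
def Spec_count_attacks (bishops : List (Int × Int)) (out : Int) : Prop := out = count_attacks_alt bishops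
instance (bishops : List (Int × Int)) (out : Int) : Decidable (Spec_count_attacks bishops out) := by unfold Spec_count_attacks; infer_instance

-- ===== CLAIM (what is proved, stated in full; the proofs are below) =====
def Claim_equal_count_attacks : Prop := ∀ (bishops : List (Int × Int)), Dom_count_attacks bishops → Spec_count_attacks bishops (count_attacks bishops)

-- ===== LEMMAS AND PROOFS =====

-- the pair predicate of A
def pvP (c : (Int × Int) × (Int × Int)) : Bool :=
  (c.1.1 - c.2.1).natAbs == (c.1.2 - c.2.2).natAbs

-- A's value as a countP over the combinations list
def pvN (l : List (Int × Int)) : Int := ((pvCombs2 l).countP pvP : Int)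

theorem pv_foldl_count (l : List ((Int × Int) × (Int × Int))) (c : Int) :
    l.foldl (fun cnt comb =>
      let first := comb.1
      let second := comb.2
      if (first.1 - second.1).natAbs == (first.2 - second.2).natAbs then cnt + 1 else cnt) c
    = c + (l.countP pvP : Int) := by
  induction l generalizing c with
  | nil => simp
  | cons h t ih =>
    simp only [List.foldl_cons, List.countP_cons, ih, pvP]
    split_ifs with hp <;> simp [hp] <;> push_cast <;> ring

theorem pv_countA (l : List (Int × Int)) : count_attacks l = pvN l := by
  simpa [count_attacks, pvN] using pv_foldl_count (pvCombs2 l) 0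

-- N (p ++ [x]) = N p + (# y in p attacking x)
theorem pvN_append_singleton (p : List (Int × Int)) (x : Int × Int) :
    pvN (p ++ [x]) = pvN p + (p.countP (fun y => pvP (y, x)) : Int) := by
  induction p with
  | nil => simp [pvN, pvCombs2]
  | cons a p ih =>
    have h1 : pvN ((a :: p) ++ [x])
        = ((p ++ [x]).countP (fun y => pvP (a, y)) : Int) + pvN (p ++ [x]) := by
      simp only [List.cons_append, pvN, pvCombs2, List.countP_append, List.countP_map,
        Function.comp_def]
      push_cast; ring
    have h2 : pvN (a :: p) = (p.countP (fun y => pvP (a, y)) : Int) + pvN p := by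
      simp only [pvN, pvCombs2, List.countP_append, List.countP_map, Function.comp_def]
      push_cast; ring
    have h3 : ((p ++ [x]).countP (fun y => pvP (a, y)) : Int)
        = (p.countP (fun y => pvP (a, y)) : Int) + (if pvP (a, x) then 1 else 0) := by
      simp only [List.countP_append, List.countP_cons, List.countP_nil]
      split_ifs with h <;> simp [h] <;> push_cast <;> ring
    have h4 : (((a :: p).countP (fun y => pvP (y, x))) : Int)
        = (if pvP (a, x) then 1 else 0) + (p.countP (fun y => pvP (y, x)) : Int) := by
      simp only [List.countP_cons]
      split_ifs with h <;> simp [h] <;> push_cast <;> ring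
    rw [h1, h2, h3, h4, ih]
    ring

-- inclusion–exclusion for countP, over Int
theorem pv_countP_or (l : List (Int × Int)) (A B : (Int × Int) → Bool) :
    (l.countP (fun y => A y || B y) : Int)
      = (l.countP A : Int) + (l.countP B : Int) - (l.countP (fun y => A y && B y) : Int) := by
  induction l with
  | nil => simp
  | cons h t ih =>
    simp only [List.countP_cons]
    push_cast
    cases hA : A h <;> cases hB : B h <;> simp [hA, hB] <;> omega

-- dict state after processing p, for each of the three dicts
def pvMkS (p : List (Int × Int)) : PySem.Dict Int Int :=
  p.foldl (fun d b => d.insert (b.1 + b.2) (d.getD (b.1 + b.2) 0 + 1)) PySem.Dict.empty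
def pvMkD (p : List (Int × Int)) : PySem.Dict Int Int :=
  p.foldl (fun d b => d.insert (b.1 - b.2) (d.getD (b.1 - b.2) 0 + 1)) PySem.Dict.empty
def pvMkP (p : List (Int × Int)) : PySem.Dict (Int × Int) Int :=
  p.foldl (fun d b => d.insert b (d.getD b 0 + 1)) PySem.Dict.empty

theorem pvMkS_getD (p : List (Int × Int)) (k : Int) :
    (pvMkS p).getD k 0 = (p.countP (fun b => b.1 + b.2 == k) : Int) := by
  have h : pvMkS p
      = (p.map (fun b => b.1 + b.2)).foldl (fun d x => d.insert x (d.getD x 0 + 1))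
          PySem.Dict.empty := by
    simp [pvMkS, List.foldl_map]
  rw [h, PySem.Dict.getD_foldl_insert_add_one]
  simp [List.count, List.countP_map, Function.comp_def, PySem.Dict.getD_empty]

theorem pvMkD_getD (p : List (Int × Int)) (k : Int) :
    (pvMkD p).getD k 0 = (p.countP (fun b => b.1 - b.2 == k) : Int) := by
  have h : pvMkD p
      = (p.map (fun b => b.1 - b.2)).foldl (fun d x => d.insert x (d.getD x 0 + 1))
          PySem.Dict.empty := by
    simp [pvMkD, List.foldl_map]
  rw [h, PySem.Dict.getD_foldl_insert_add_one]
  simp [List.count, List.countP_map, Function.comp_def, PySem.Dict.getD_empty]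

theorem pvMkP_getD (p : List (Int × Int)) (k : Int × Int) :
    (pvMkP p).getD k 0 = (p.countP (fun b => b == k) : Int) := by
  rw [pvMkP, PySem.Dict.getD_foldl_insert_add_one]
  simp [List.count, PySem.Dict.getD_empty]

-- the pointwise inclusion–exclusion: sharing a diagonal ⟺ same r+c or same r-c, both ⟺ same cell
theorem pv_shares (x y : Int × Int) :
    pvP (y, x) = ((y.1 + y.2 == x.1 + x.2) || (y.1 - y.2 == x.1 - x.2)) := by
  rcases x with ⟨x1, x2⟩; rcases y with ⟨y1, y2⟩
  rw [Bool.eq_iff_iff]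
  simp only [pvP, beq_iff_eq, Bool.or_eq_true]
  omega

theorem pv_both (x y : Int × Int) :
    ((y.1 + y.2 == x.1 + x.2) && (y.1 - y.2 == x.1 - x.2)) = (y == x) := by
  rcases x with ⟨x1, x2⟩; rcases y with ⟨y1, y2⟩
  rw [Bool.eq_iff_iff]
  simp only [Bool.and_eq_true, beq_iff_eq, Prod.mk.injEq]
  omega

-- main invariant of B's loop
theorem pvLoopB_inv (xs : List (Int × Int)) :
    ∀ (p : List (Int × Int)) (cnt : Int),
    pvLoopB xs (pvMkS p) (pvMkD p) (pvMkP p) cnt = cnt + pvN (p ++ xs) - pvN p := by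
  induction xs with
  | nil => intro p cnt; simp [pvLoopB]
  | cons x xs ih =>
    intro p cnt
    have hS : pvMkS (p ++ [x]) = (pvMkS p).insert (x.1 + x.2) ((pvMkS p).getD (x.1 + x.2) 0 + 1) := by
      simp [pvMkS, List.foldl_append]
    have hD : pvMkD (p ++ [x]) = (pvMkD p).insert (x.1 - x.2) ((pvMkD p).getD (x.1 - x.2) 0 + 1) := by
      simp [pvMkD, List.foldl_append]
    have hP : pvMkP (p ++ [x]) = (pvMkP p).insert x ((pvMkP p).getD x 0 + 1) := by
      simp [pvMkP, List.foldl_append]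
    have hcnt : (pvMkS p).getD (x.1 + x.2) 0 + (pvMkD p).getD (x.1 - x.2) 0
        - (pvMkP p).getD x 0 = (p.countP (fun y => pvP (y, x)) : Int) := by
      rw [pvMkS_getD, pvMkD_getD, pvMkP_getD]
      have hie := pv_countP_or p (fun y => y.1 + y.2 == x.1 + x.2) (fun y => y.1 - y.2 == x.1 - x.2)
      have e1 : p.countP (fun y => pvP (y, x))
          = p.countP (fun y => (y.1 + y.2 == x.1 + x.2) || (y.1 - y.2 == x.1 - x.2)) :=
        List.countP_congr (fun y _ => by rw [pv_shares x y])
      have e2 : p.countP (fun y => (y.1 + y.2 == x.1 + x.2) && (y.1 - y.2 == x.1 - x.2))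
          = p.countP (fun y => y == x) :=
        List.countP_congr (fun y _ => by rw [pv_both x y])
      rw [e1]
      rw [e2] at hie
      omega
    rw [pvLoopB, ← hS, ← hD, ← hP, ih (p ++ [x])]
    rw [pvN_append_singleton p x] at *
    simp only [List.append_assoc, List.cons_append, List.nil_append] at *
    omega

-- ===== VERDICT (by name: the statement is the Claim_ definition above) =====
theorem count_attacks_spec : Claim_equal_count_attacks := by
  intro bishops _
  show count_attacks bishops = count_attacks_alt bishops
  have h := pvLoopB_inv bishops [] 0
  simp only [List.nil_append] at h
  rw [pv_countA, count_attacks_alt]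
  have hN : pvN ([] : List (Int × Int)) = 0 := by simp [pvN, pvCombs2]
  rw [show pvMkS [] = PySem.Dict.empty from rfl, show pvMkD [] = PySem.Dict.empty from rfl,
    show pvMkP [] = PySem.Dict.empty from rfl] at h
  omega
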